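-- pv_equiv track=rewrite | github.com/SEDarrow/PythonCode | ProjectEuler.py | distinctPowers
-- ===== SOURCE A (Python) =====
-- def distinctPowers(a, b):
--     powers = {}
--
--     for base in range(a, 1, -1):
--         for exponent in range(b, 1, -1):
--             try:
--                 powers[base**exponent] = 1
--             except:
--                 break
--     return len(powers)
-- ===== SOURCE B (Python) =====
-- def distinctPowers(a, b):
--     # enumerate all powers ascending, sort, count run boundaries between equal values
--     vals = [base ** exponent for base in range(2, a + 1) for exponent in range(2, b + 1)]
--     vals.sort()
--     count = 0
--     prev = None
--     for v in vals:
--         if prev is None or v != prev: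
--             count += 1
--         prev = v
--     return count
-- ===== Notes on version B (the rewrite author's own statement) =====
-- stated objective: alternative
-- what changed: B enumerates the powers in ascending order into a list, sorts it and counts run boundaries in one scan, instead of A's hash-dict deduplication over descending ranges.
import Mathlib
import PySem

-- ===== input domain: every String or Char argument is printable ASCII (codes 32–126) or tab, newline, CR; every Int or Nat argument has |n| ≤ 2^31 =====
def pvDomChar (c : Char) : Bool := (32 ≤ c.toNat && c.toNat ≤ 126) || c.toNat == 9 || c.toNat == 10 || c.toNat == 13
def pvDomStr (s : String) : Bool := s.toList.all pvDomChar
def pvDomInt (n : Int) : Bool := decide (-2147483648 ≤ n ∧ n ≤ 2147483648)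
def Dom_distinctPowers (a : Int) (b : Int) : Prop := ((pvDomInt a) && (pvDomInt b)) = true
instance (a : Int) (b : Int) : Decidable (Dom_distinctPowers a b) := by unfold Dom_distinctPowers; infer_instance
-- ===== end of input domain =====

-- B replaces A's hash-dict deduplication over descending ranges by: enumerate the powers
-- in ascending order, sort, count run boundaries in one scan (alternative algorithm, same exact count).

-- ===== PORT A =====
-- A's try/except can never fire: both loop variables are ≥ 2, so base**exponent is an
-- ordinary int power (exponent ≥ 2 ≥ 0, hence `e.toNat` is exact); ported without it.
def distinctPowers (a : Int) (b : Int) : Int :=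
  let powers : PySem.Dict Int Int :=
    (PySem.List.pyRange a 1 (-1)).foldl (fun d base =>
      (PySem.List.pyRange b 1 (-1)).foldl (fun d exponent =>
        d.insert (base ^ exponent.toNat) 1) d) PySem.Dict.empty
  (powers.size : Int)

-- ===== PORT B =====
def distinctPowers_alt (a : Int) (b : Int) : Int :=
  let vals : List Int :=
    (PySem.List.pyRange 2 (a + 1) 1).flatMap (fun base =>
      (PySem.List.pyRange 2 (b + 1) 1).map (fun exponent => base ^ exponent.toNat))
  -- vals.sort(): stable ascending sort, ported as the standard-library merge sort
  let svals := vals.mergeSort (fun x y => x ≤ y)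
  let res : Int × Option Int :=
    svals.foldl (fun st v =>
      if st.2 = none ∨ st.2 ≠ some v then (st.1 + 1, some v) else (st.1, some v)) (0, none)
  res.1

-- ===== PRECONDITION & SPEC =====
def Spec_distinctPowers (a : Int) (b : Int) (out : Int) : Prop := out = distinctPowers_alt a b
instance (a : Int) (b : Int) (out : Int) : Decidable (Spec_distinctPowers a b out) := by unfold Spec_distinctPowers; infer_instance

-- ===== CLAIM (what is proved, stated in full; the proofs are below) =====
def Claim_equal_distinctPowers : Prop := ∀ (a : Int) (b : Int), Dom_distinctPowers a b → Spec_distinctPowers a b (distinctPowers a b)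

-- ===== LEMMAS AND PROOFS =====

-- (insert x t).card = (t.erase x).card + 1
theorem pv_card_insert_erase (x : Int) (t : Finset Int) :
    (insert x t).card = (t.erase x).card + 1 := by
  have h : insert x t = insert x (t.erase x) := by
    ext y; simp; tauto
  rw [h, Finset.card_insert_of_notMem (Finset.notMem_erase x t)]

-- the deduplicated length of a list is the cardinality of its set of elements
theorem pv_ofList_length (l : List Int) :
    (PySem.Set.ofList l).length = l.toFinset.card := by
  have hnd := PySem.Set.nodup_ofList (xs := l)
  have : (PySem.Set.ofList l).toFinset = l.toFinset := by
    ext y; simp [PySem.Set.mem_ofList]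
  rw [← this, List.toFinset_card_of_nodup hnd]

-- A's nested insert loop: final keys = Set.update of the flattened key list
theorem pv_keys_nested (erange : List Int) (f : Int → Int → Int) :
    ∀ (outer : List Int) (d : PySem.Dict Int Int),
    (outer.foldl (fun d base =>
        erange.foldl (fun d exponent => d.insert (f base exponent) 1) d) d).keys
      = PySem.Set.update d.keys (outer.flatMap (fun base => erange.map (f base))) := by
  intro outer
  induction outer with
  | nil => intro d; simp [PySem.Set.update_nil]
  | cons x t ih =>
      intro d
      simp only [List.foldl_cons, List.flatMap_cons]
      rw [ih, PySem.Dict.keys_foldl_insert_key (key := f x) (f := fun _ _ => (1 : Int)),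
        PySem.Set.update_append]

-- B's run-boundary scan on a sorted list counts the distinct elements (state prev = some p)
theorem pv_scan_some (s : List Int) :
    ∀ (p : Int) (c : Int), (p :: s).Pairwise (· ≤ ·) →
    (s.foldl (fun (st : Int × Option Int) v =>
        if st.2 = none ∨ st.2 ≠ some v then (st.1 + 1, some v) else (st.1, some v)) (c, some p)).1
      = c + ((s.toFinset.erase p).card : Int) := by
  induction s with
  | nil => intro p c _; simp
  | cons y ys ih =>
      intro p c hp
      have hpy : p ≤ y := (List.pairwise_cons.mp hp).1 y (by simp)
      have hys : (y :: ys).Pairwise (· ≤ ·) := (List.pairwise_cons.mp hp).2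
      by_cases hxy : y = p
      · subst hxy
        have : ((some y = none ∨ some y ≠ some y)) = False := by simp
        simp only [List.foldl_cons]
        rw [if_neg (by simp)]
        rw [ih y c hys]
        have he : (y :: ys).toFinset.erase y = ys.toFinset.erase y := by
          ext z; simp
        rw [he]
      · simp only [List.foldl_cons]
        rw [if_pos (by simp [Ne]; exact fun h => hxy h.symm)]
        rw [ih y (c + 1) hys]
        have hpnot : p ∉ (y :: ys) := by
          intro hmem
          rcases List.mem_cons.mp hmem with h | h
          · exact hxy h.symm
          · have := (List.pairwise_cons.mp hys).1 p h
            exact hxy (le_antisymm this hpy)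
        have : (y :: ys).toFinset.erase p = (y :: ys).toFinset := by
          apply Finset.erase_eq_of_notMem; simpa using hpnot
        rw [List.toFinset_cons] at this
        rw [List.toFinset_cons, this, pv_card_insert_erase]
        push_cast; ring
  
-- the full scan from (0, none)
theorem pv_scan (s : List Int) (h : s.Pairwise (· ≤ ·)) :
    (s.foldl (fun (st : Int × Option Int) v =>
        if st.2 = none ∨ st.2 ≠ some v then (st.1 + 1, some v) else (st.1, some v)) (0, none)).1
      = (s.toFinset.card : Int) := by
  cases s with
  | nil => simp
  | cons x xs =>
      simp only [List.foldl_cons]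
      have hstep : (if True ∨ (none : Option Int) ≠ some x
          then ((0 : Int) + 1, some x) else (0, some x)) = (1, some x) := by simp
      rw [hstep, pv_scan_some xs x 1 h]
      rw [List.toFinset_cons, pv_card_insert_erase]
      push_cast; ring

-- ===== VERDICT (by name: the statement is the Claim_ definition above) =====
theorem pv_size_eq_keys_length (d : PySem.Dict Int Int) : d.size = d.keys.length := by
  simp [PySem.Dict.size, PySem.Dict.keys]

theorem distinctPowers_spec : Claim_equal_distinctPowers := by
  intro a b _
  unfold Spec_distinctPowers distinctPowers distinctPowers_alt
  dsimp only
  -- A side: keys of the nested insert loop = dedup of the flattened key list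
  rw [pv_size_eq_keys_length,
    pv_keys_nested (PySem.List.pyRange b 1 (-1)) (fun base e => base ^ e.toNat)]
  set L := (PySem.List.pyRange 2 (a + 1) 1).flatMap
      (fun base => (PySem.List.pyRange 2 (b + 1) 1).map (fun e => base ^ e.toNat)) with hL
  set K := (PySem.List.pyRange a 1 (-1)).flatMap
      (fun base => (PySem.List.pyRange b 1 (-1)).map (fun e => base ^ e.toNat)) with hK
  -- B side: sorted scan counts the distinct values
  have hpw : (L.mergeSort (fun x y => x ≤ y)).Pairwise (· ≤ ·) := by
    have := List.pairwise_mergeSort (le := fun x y : Int => decide (x ≤ y)) (l := L)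
      (by intro a b c; simp; omega) (by intro a b; simp; omega)
    simpa using this
  rw [pv_scan _ hpw]
  have hsf : (L.mergeSort (fun x y => x ≤ y)).toFinset = L.toFinset := by
    ext z; simp [List.mem_mergeSort]
  rw [hsf]
  -- A side: empty dict, update [] = ofList, length of dedup = card
  rw [PySem.Dict.keys_empty, PySem.Set.update_nil_left, pv_ofList_length]
  -- the two flattened lists have the same elements
  have hKL : K.toFinset = L.toFinset := by
    ext z
    simp only [List.mem_toFinset, List.mem_flatMap, List.mem_map,
      PySem.List.mem_pyRange_neg_one, PySem.List.mem_pyRange_one, hK, hL]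
    constructor
    · rintro ⟨base, ⟨h1, h2⟩, e, ⟨⟨h3, h4⟩, rfl⟩⟩
      exact ⟨base, ⟨by omega, by omega⟩, e, ⟨⟨by omega, by omega⟩, rfl⟩⟩
    · rintro ⟨base, ⟨h1, h2⟩, e, ⟨⟨h3, h4⟩, rfl⟩⟩
      exact ⟨base, ⟨by omega, by omega⟩, e, ⟨⟨by omega, by omega⟩, rfl⟩⟩
  rw [hKL]
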